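-- pv_equiv track=rewrite | github.com/MageshwarSV/boosterentery_ai_ui_code | watch_and_send.py | choose_column
-- ===== SOURCE A (Python) =====
-- from typing import Optional, Tuple, Dict, List, Any
--
-- def choose_column(available: List[str], candidates: List[str]) -> Optional[str]:
--     avail_lower = {c.lower(): c for c in available}
--     for cand in candidates:
--         if cand.lower() in avail_lower:
--             return avail_lower[cand.lower()]
--     for cand in candidates:
--         lowcand = cand.lower()
--         for col_lower, col_actual in avail_lower.items():
--             if lowcand in col_lower or col_lower in lowcand:
--                 return col_actual
--     return None
-- ===== SOURCE B (Python) =====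
-- def choose_column(available, candidates):
--     avail_lower = {c.lower(): c for c in available}
--     first_substring = None
--     for cand in candidates:
--         lc = cand.lower()
--         hit = avail_lower.get(lc)
--         if hit is not None:
--             return hit
--         if first_substring is None:
--             for col_lower, col_actual in avail_lower.items():
--                 if lc in col_lower or col_lower in lc:
--                     first_substring = col_actual
--                     break
--     return first_substring
-- ===== Notes on version B (the rewrite author's own statement) =====
-- stated objective: alternative
-- what changed: Replaces A's two sequential passes over candidates (exact pass, then substring pass) by one pass holding a first_substring sentinel: exact matches return eagerly, the first substring hit is recorded once and returned only after all candidates fail to match exactly.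
import Mathlib
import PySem

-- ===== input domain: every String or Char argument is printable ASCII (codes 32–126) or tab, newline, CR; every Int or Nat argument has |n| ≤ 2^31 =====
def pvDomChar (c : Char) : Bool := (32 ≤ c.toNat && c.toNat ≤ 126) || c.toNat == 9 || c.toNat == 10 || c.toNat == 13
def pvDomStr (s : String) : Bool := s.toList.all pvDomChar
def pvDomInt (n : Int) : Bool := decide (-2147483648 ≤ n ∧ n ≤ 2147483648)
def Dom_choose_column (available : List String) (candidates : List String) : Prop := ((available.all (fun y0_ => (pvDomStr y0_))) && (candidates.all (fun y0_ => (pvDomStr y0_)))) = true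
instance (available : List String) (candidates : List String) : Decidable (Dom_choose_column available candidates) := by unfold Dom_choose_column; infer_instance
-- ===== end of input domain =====

-- B differs from A by one decomposition change: A's two sequential passes over the
-- candidates become one pass holding a first-substring-hit sentinel (same results).

-- ===== PORT A =====
-- first loop: return avail_lower[cand.lower()] on the first exact (lowercased) key hit
def pvAPass1 (d : PySem.Dict String String) : List String → Option String
  | [] => none
  | cand :: rest =>
    if d.contains (PySem.Str.lower cand) then d.get? (PySem.Str.lower cand)
    else pvAPass1 d rest

-- inner loop of the second pass: first item whose key is a sub/superstring of lowcand
def pvAInner (lowcand : String) : List (String × String) → Option String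
  | [] => none
  | (col_lower, col_actual) :: rest =>
    if PySem.Str.isIn lowcand col_lower || PySem.Str.isIn col_lower lowcand then some col_actual
    else pvAInner lowcand rest

-- second loop over candidates
def pvAPass2 (d : PySem.Dict String String) : List String → Option String
  | [] => none
  | cand :: rest =>
    match pvAInner (PySem.Str.lower cand) d.items with
    | some v => some v
    | none => pvAPass2 d rest

def choose_column (available : List String) (candidates : List String) : Option String :=
  let avail_lower := available.foldl (fun d c => d.insert (PySem.Str.lower c) c) PySem.Dict.empty
  match pvAPass1 avail_lower candidates with
  | some v => some v
  | none => pvAPass2 avail_lower candidates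

-- ===== PORT B =====
-- inner break-scan: first item with a sub/superstring relation, as an Option
def pvBScan (lc : String) (items : List (String × String)) : Option String :=
  (items.find? (fun p => PySem.Str.isIn lc p.1 || PySem.Str.isIn p.1 lc)).map Prod.snd

-- single pass carrying the first_substring sentinel
def pvBLoop (d : PySem.Dict String String) (first_substring : Option String) :
    List String → Option String
  | [] => first_substring
  | cand :: rest =>
    let lc := PySem.Str.lower cand
    match d.get? lc with
    | some hit => some hit
    | none =>
      pvBLoop d (if first_substring.isNone then pvBScan lc d.items else first_substring) rest

def choose_column_alt (available : List String) (candidates : List String) : Option String :=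
  let avail_lower := available.foldl (fun d c => d.insert (PySem.Str.lower c) c) PySem.Dict.empty
  pvBLoop avail_lower none candidates

-- ===== PRECONDITION & SPEC =====
def Spec_choose_column (available : List String) (candidates : List String) (out : Option String) : Prop := out = choose_column_alt available candidates
instance (available : List String) (candidates : List String) (out : Option String) : Decidable (Spec_choose_column available candidates out) := by unfold Spec_choose_column; infer_instance

-- ===== CLAIM (what is proved, stated in full; the proofs are below) =====
def Claim_equal_choose_column : Prop := ∀ (available : List String) (candidates : List String), Dom_choose_column available candidates → Spec_choose_column available candidates (choose_column available candidates)

-- ===== LEMMAS AND PROOFS =====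

theorem pvAInner_eq_scan (lc : String) (items : List (String × String)) :
    pvAInner lc items = pvBScan lc items := by
  induction items with
  | nil => rfl
  | cons p rest ih =>
    obtain ⟨k, v⟩ := p
    simp only [pvAInner, pvBScan, List.find?]
    by_cases h1 : PySem.Chars.isIn lc.toList k.toList = true <;>
      by_cases h2 : PySem.Chars.isIn k.toList lc.toList = true <;>
      simp [h1, h2] <;> exact ih

-- with the sentinel already set, B returns it unless a later exact hit overrides
theorem pvBLoop_some (d : PySem.Dict String String) (w : String) (cs : List String) :
    pvBLoop d (some w) cs =
      match pvAPass1 d cs with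
      | some v => some v
      | none => some w := by
  induction cs with
  | nil => rfl
  | cons c rest ih =>
    simp only [pvBLoop, pvAPass1, PySem.Dict.contains_eq_isSome_get?]
    cases h : d.get? (PySem.Str.lower c) with
    | some v => simp
    | none => simpa [h] using ih

-- main invariant: B's single pass from an unset sentinel equals A's two passes
theorem pvBLoop_none (d : PySem.Dict String String) (cs : List String) :
    pvBLoop d none cs =
      match pvAPass1 d cs with
      | some v => some v
      | none => pvAPass2 d cs := by
  induction cs with
  | nil => rfl
  | cons c rest ih =>
    simp only [pvBLoop, pvAPass1, pvAPass2, PySem.Dict.contains_eq_isSome_get?]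
    cases h : d.get? (PySem.Str.lower c) with
    | some v => simp
    | none =>
      simp only [Option.isSome_none, Bool.false_eq_true, if_false,
        Option.isNone_none, if_true]
      rw [← pvAInner_eq_scan]
      cases hs : pvAInner (PySem.Str.lower c) d.items with
      | some w => rw [pvBLoop_some]
      | none => simpa using ih

-- ===== VERDICT (by name: the statement is the Claim_ definition above) =====
theorem choose_column_spec : Claim_equal_choose_column := by
  intro available candidates _
  unfold Spec_choose_column choose_column choose_column_alt
  rw [pvBLoop_none]
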